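-- pv_equiv track=rewrite | github.com/MazsolasPuding/Python | Exercises/Interview_prep/GeeksForGeeks/count_the_triplets.py | triplet_counter
-- ===== SOURCE A (Python) =====
-- def triplet_counter(arr, length):
--     count = 0
--
--     for i in range(length):
--         for j in range(length):
--             if j == i: continue
--             for k in range(length):
--                 if j == k: continue
--                 if arr[i] == arr[j] + arr[k]:
--                     count += 1
--
--     return count
-- ===== SOURCE B (Python) =====
-- def triplet_counter(arr, length):
--     # Count i's via a value-frequency map instead of an inner scan: for each
--     # ordered pair (j, k) with k != j, the number of valid i with
--     # arr[i] == arr[j] + arr[k] and i != j is count(s) - (1 if arr[k] == 0).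
--     cnt = {}
--     for v in arr[:length]:
--         cnt[v] = cnt.get(v, 0) + 1
--     total = 0
--     for j in range(length):
--         for k in range(length):
--             if k == j:
--                 continue
--             total += cnt.get(arr[j] + arr[k], 0)
--             if arr[k] == 0:
--                 total -= 1
--     return total
-- ===== Notes on version B (the rewrite author's own statement) =====
-- stated objective: faster
-- what changed: A's innermost scan over i is replaced by a value-frequency dictionary built once: for each ordered pair (j,k) with k!=j, B adds cnt[arr[j]+arr[k]] and subtracts 1 when arr[k]==0 to discount the i==j index collision.
import Mathlib
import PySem

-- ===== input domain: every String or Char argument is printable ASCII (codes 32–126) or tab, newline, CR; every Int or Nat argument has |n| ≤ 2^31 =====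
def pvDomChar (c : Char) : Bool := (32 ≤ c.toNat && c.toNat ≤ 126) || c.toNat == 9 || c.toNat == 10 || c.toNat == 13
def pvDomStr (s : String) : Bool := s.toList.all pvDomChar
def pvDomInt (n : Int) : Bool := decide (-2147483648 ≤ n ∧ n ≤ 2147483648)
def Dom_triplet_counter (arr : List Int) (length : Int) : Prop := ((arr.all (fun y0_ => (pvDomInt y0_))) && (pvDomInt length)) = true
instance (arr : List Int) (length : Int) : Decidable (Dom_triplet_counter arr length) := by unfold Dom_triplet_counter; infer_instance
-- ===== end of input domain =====

-- B replaces A's innermost scan over i by a value-frequency dictionary built once: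
-- for each ordered pair (j, k) with k ≠ j it adds cnt[arr[j]+arr[k]] minus an index-collision
-- correction; measured faster. Equal return value on every input where A returns.

-- ===== PORT A =====
def triplet_counter (arr : List Int) (length : Int) : Int :=
  (PySem.List.pyRange 0 length 1).foldl (fun count i =>
    (PySem.List.pyRange 0 length 1).foldl (fun count j =>
      if j == i then count else
      (PySem.List.pyRange 0 length 1).foldl (fun count k =>
        if j == k then count
        else if PySem.List.pyGetD arr i 0 == PySem.List.pyGetD arr j 0 + PySem.List.pyGetD arr k 0
          then count + 1 else count) count) count) 0
  -- arr[i] ported as pyGetD … 0: exact whenever the index is in range, which Pre_ guarantees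

-- ===== PORT B =====
def triplet_counter_alt (arr : List Int) (length : Int) : Int :=
  let cnt := (PySem.List.slice arr none (some length)).foldl
      (fun d v => d.insert v (d.getD v 0 + 1)) PySem.Dict.empty
  (PySem.List.pyRange 0 length 1).foldl (fun total j =>
    (PySem.List.pyRange 0 length 1).foldl (fun total k =>
      if k == j then total
      else
        let total := total + cnt.getD (PySem.List.pyGetD arr j 0 + PySem.List.pyGetD arr k 0) 0
        if PySem.List.pyGetD arr k 0 == 0 then total - 1 else total) total) 0

-- ===== PRECONDITION & SPEC =====
-- Pre_ excludes exactly the inputs where Python A raises IndexError: length > len(arr).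
def Pre_triplet_counter (arr : List Int) (length : Int) : Prop := length ≤ (arr.length : Int)
instance (arr : List Int) (length : Int) : Decidable (Pre_triplet_counter arr length) := by
  unfold Pre_triplet_counter; infer_instance
def pvWitness_triplet_counter : List Int × Int := ([1, 2, 3, 1, 0], 5)

def Spec_triplet_counter (arr : List Int) (length : Int) (out : Int) : Prop := out = triplet_counter_alt arr length
instance (arr : List Int) (length : Int) (out : Int) : Decidable (Spec_triplet_counter arr length out) := by unfold Spec_triplet_counter; infer_instance

-- ===== CLAIM (what is proved, stated in full; the proofs are below) =====
def Claim_equal_triplet_counter : Prop := ∀ (arr : List Int) (length : Int), Dom_triplet_counter arr length → Pre_triplet_counter arr length → Spec_triplet_counter arr length (triplet_counter arr length)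

-- ===== LEMMAS AND PROOFS =====

-- a foldl whose step is init-additive is init + a sum over Finset.range
theorem pv_foldl_range_eq_add_sum (n : ℕ) (step : Int → ℕ → Int) (G : ℕ → Int)
    (h : ∀ acc x, step acc x = acc + G x) (a : Int) :
    (List.range n).foldl step a = a + ∑ i ∈ Finset.range n, G i := by
  induction n generalizing a with
  | zero => simp
  | succ m ih =>
    rw [List.range_succ, List.foldl_append, Finset.sum_range_succ, ih]
    simp [h, add_assoc]

theorem pv_count_eq_sum (l : List Int) (s : Int) :
    (l.count s : Int) = ∑ i ∈ Finset.range l.length, (if l.getD i 0 = s then (1 : Int) else 0) := by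
  induction l with
  | nil => simp
  | cons x xs ih =>
    rw [List.length_cons, Finset.sum_range_succ']
    simp only [List.getD_cons_succ, List.getD_cons_zero]
    rw [← ih, List.count_cons]
    by_cases hx : x = s
    · subst hx; simp [add_comm]
    · have : (x == s) = false := beq_eq_false_iff_ne.mpr hx
      simp [this, hx]

theorem pv_sum_skip (n j : ℕ) (hj : j < n) (F : ℕ → Int) :
    ∑ i ∈ Finset.range n, (if i = j then 0 else F i)
      = (∑ i ∈ Finset.range n, F i) - F j := by
  have hpt : ∀ i, (if i = j then (0 : Int) else F i) = F i - (if i = j then F i else 0) := by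
    intro i; split_ifs <;> ring
  simp only [hpt, Finset.sum_sub_distrib]
  rw [Finset.sum_ite_eq' (Finset.range n) j F]
  simp [Finset.mem_range.mpr hj]

theorem pv_getD_take (arr : List Int) (n i : ℕ) (hi : i < n) (hn : n ≤ arr.length) :
    (arr.take n).getD i 0 = arr.getD i 0 := by
  have h1 : i < arr.length := lt_of_lt_of_le hi hn
  have h2 : i < (arr.take n).length := by simp [List.length_take]; omega
  rw [List.getD_eq_getElem _ _ h2, List.getD_eq_getElem _ _ h1, List.getElem_take]

-- sum shape of port A
theorem pv_A_shape (arr : List Int) (n : ℕ) :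
    triplet_counter arr (n : Int)
      = ∑ i ∈ Finset.range n, ∑ j ∈ Finset.range n, ∑ k ∈ Finset.range n,
          (if j = i then 0 else if k = j then 0
           else if arr.getD i 0 = arr.getD j 0 + arr.getD k 0 then (1 : Int) else 0) := by
  unfold triplet_counter
  rw [PySem.List.pyRange_zero_natCast]
  simp only [List.foldl_map]
  rw [pv_foldl_range_eq_add_sum n _
      (fun i => ∑ j ∈ Finset.range n, ∑ k ∈ Finset.range n,
        (if j = i then 0 else if k = j then 0
         else if arr.getD i 0 = arr.getD j 0 + arr.getD k 0 then (1 : Int) else 0))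
      (fun acc i => by
        rw [pv_foldl_range_eq_add_sum n _
            (fun j => ∑ k ∈ Finset.range n,
              (if j = i then 0 else if k = j then 0
               else if arr.getD i 0 = arr.getD j 0 + arr.getD k 0 then (1 : Int) else 0))
            (fun acc j => by
              by_cases hji : j = i
              · simp [hji]
              · have hb : ((j : Int) == (i : Int)) = false := by
                  simp [beq_iff_eq]; exact_mod_cast hji
                simp only [hb, Bool.false_eq_true, if_false, hji]
                rw [pv_foldl_range_eq_add_sum n _
                    (fun k => if k = j then 0
                      else if arr.getD i 0 = arr.getD j 0 + arr.getD k 0 then (1 : Int) else 0)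
                    (fun acc k => by
                      by_cases hkj : k = j
                      · have hb2 : ((j : Int) == (k : Int)) = true := by
                          simp [beq_iff_eq, hkj]
                        simp [hb2, hkj]
                      · have hb2 : ((j : Int) == (k : Int)) = false := by
                          simp [beq_iff_eq]; intro h; exact hkj (by exact_mod_cast h.symm)
                        simp only [hb2, Bool.false_eq_true, if_false, hkj, beq_iff_eq,
                          PySem.List.pyGetD_natCast]
                        split_ifs <;> ring) acc]) acc]) 0]
  simp

-- sum shape of port B
theorem pv_B_shape (arr : List Int) (n : ℕ) :
    triplet_counter_alt arr (n : Int)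
      = ∑ j ∈ Finset.range n, ∑ k ∈ Finset.range n,
          (if k = j then 0
           else (((arr.take n).count (arr.getD j 0 + arr.getD k 0) : Int)
                 - if arr.getD k 0 = 0 then 1 else 0)) := by
  unfold triplet_counter_alt
  rw [PySem.Dict.foldl_insert_getD_add_one_eq_counter, PySem.List.slice_to_natCast,
    PySem.List.pyRange_zero_natCast]
  simp only [List.foldl_map]
  rw [pv_foldl_range_eq_add_sum n _
      (fun j => ∑ k ∈ Finset.range n,
        (if k = j then 0
         else (((arr.take n).count (arr.getD j 0 + arr.getD k 0) : Int)
               - if arr.getD k 0 = 0 then 1 else 0)))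
      (fun acc j => by
        rw [pv_foldl_range_eq_add_sum n _
            (fun k => if k = j then 0
              else (((arr.take n).count (arr.getD j 0 + arr.getD k 0) : Int)
                    - if arr.getD k 0 = 0 then 1 else 0))
            (fun acc k => by
              by_cases hkj : k = j
              · have hb : ((k : Int) == (j : Int)) = true := by simp [beq_iff_eq, hkj]
                simp [hb, hkj]
              · have hb : ((k : Int) == (j : Int)) = false := by
                  simp [beq_iff_eq]; exact_mod_cast hkj
                simp only [hb, Bool.false_eq_true, if_false, hkj, beq_iff_eq,
                  PySem.List.pyGetD_natCast, PySem.Dict.getD_counter]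
                split_ifs <;> ring) acc]) 0]
  simp

-- ===== VERDICT (by name: the statement is the Claim_ definition above) =====
theorem triplet_counter_spec : Claim_equal_triplet_counter := by
  intro arr length _ hpre
  unfold Spec_triplet_counter
  by_cases hneg : length < 0
  · have h1 : PySem.List.pyRange 0 length 1 = [] :=
      PySem.List.pyRange_one_eq_nil (by omega)
    unfold triplet_counter triplet_counter_alt
    simp [h1]
  · push_neg at hneg
    obtain ⟨n, rfl⟩ : ∃ n : ℕ, length = (n : Int) := ⟨length.toNat, (Int.toNat_of_nonneg hneg).symm⟩
    have hn : n ≤ arr.length := by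
      unfold Pre_triplet_counter at hpre; exact_mod_cast hpre
    rw [pv_A_shape, pv_B_shape]
    rw [Finset.sum_comm]
    refine Finset.sum_congr rfl (fun j hj => ?_)
    rw [Finset.sum_comm]
    refine Finset.sum_congr rfl (fun k _ => ?_)
    by_cases hkj : k = j
    · simp [hkj]
    · have hmid : ∀ i, (if j = i then (0:Int) else if k = j then 0
          else if arr.getD i 0 = arr.getD j 0 + arr.getD k 0 then 1 else 0)
          = (if i = j then 0 else if arr.getD i 0 = arr.getD j 0 + arr.getD k 0 then 1 else 0) := by
        intro i
        by_cases hij : i = j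
        · simp [hij]
        · have hji : ¬ j = i := fun h => hij h.symm
          simp [hij, hji, hkj]
      conv_rhs => rw [if_neg hkj]
      rw [Finset.sum_congr rfl (fun i _ => hmid i)]
      rw [pv_sum_skip n j (Finset.mem_range.mp hj)
        (fun i => if arr.getD i 0 = arr.getD j 0 + arr.getD k 0 then 1 else 0)]
      have hcount : ((arr.take n).count (arr.getD j 0 + arr.getD k 0) : Int)
          = ∑ i ∈ Finset.range n,
              (if arr.getD i 0 = arr.getD j 0 + arr.getD k 0 then (1:Int) else 0) := by
        rw [pv_count_eq_sum]
        have hlen : (arr.take n).length = n := by simp [List.length_take]; omega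
        rw [hlen]
        exact Finset.sum_congr rfl (fun i hi => by
          rw [pv_getD_take arr n i (Finset.mem_range.mp hi) hn])
      rw [hcount]
      have hfix : (if arr.getD j 0 = arr.getD j 0 + arr.getD k 0 then (1:Int) else 0)
          = (if arr.getD k 0 = 0 then 1 else 0) := by
        by_cases h : arr.getD k 0 = 0 <;> simp [h] <;> omega
      rw [hfix]
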